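-- pv_equiv track=rewrite | github.com/mjuraska/AMPsieve-public | epitopeDistance/ep_dist.py | get_insertions
-- ===== SOURCE A (Python) =====
-- def get_insertions(seq, ref, spacers='-. '):
--     insertions = []
--     gap_open = False
--     for i, (aa, ref_aa) in enumerate(zip(seq, ref)):
--         if aa not in spacers and ref_aa in spacers:
--             gap_open = True
--         elif ref_aa not in spacers:
--             gap_open = False
--         else:
--             pass
--         if gap_open:
--             insertions.append(i)
--     grouped = group_consecutive_int(insertions)
--     return [(gp[0], gp[-1]) for gp in grouped]
--
-- def group_consecutive_int(int_list):
--     if int_list: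
--         int_list.sort()
--         grouped = [[int_list[0]]]
--         for i, j in zip(int_list[:-1], int_list[1:]):
--             if j == i+1:
--                 grouped[-1].append(j)
--             elif j > i+1:
--                 grouped.append([j])
--             else:
--                 assert(False)
--         return grouped
--     else:
--         return []
-- ===== SOURCE B (Python) =====
-- def get_insertions(seq, ref, spacers='-. '):
--     out = []
--     start = None
--     n = min(len(seq), len(ref))
--     for i, (aa, ref_aa) in enumerate(zip(seq, ref)):
--         if aa not in spacers and ref_aa in spacers:
--             if start is None:
--                 start = i
--         elif ref_aa not in spacers:
--             if start is not None:
--                 out.append((start, i - 1))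
--                 start = None
--     if start is not None:
--         out.append((start, n - 1))
--     return out
-- ===== Notes on version B (the rewrite author's own statement) =====
-- stated objective: simpler
-- what changed: B builds the (start,end) ranges in one pass with a run-start variable, eliminating A's intermediate index list, the sort and the consecutive-grouping helper.
import Mathlib
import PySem

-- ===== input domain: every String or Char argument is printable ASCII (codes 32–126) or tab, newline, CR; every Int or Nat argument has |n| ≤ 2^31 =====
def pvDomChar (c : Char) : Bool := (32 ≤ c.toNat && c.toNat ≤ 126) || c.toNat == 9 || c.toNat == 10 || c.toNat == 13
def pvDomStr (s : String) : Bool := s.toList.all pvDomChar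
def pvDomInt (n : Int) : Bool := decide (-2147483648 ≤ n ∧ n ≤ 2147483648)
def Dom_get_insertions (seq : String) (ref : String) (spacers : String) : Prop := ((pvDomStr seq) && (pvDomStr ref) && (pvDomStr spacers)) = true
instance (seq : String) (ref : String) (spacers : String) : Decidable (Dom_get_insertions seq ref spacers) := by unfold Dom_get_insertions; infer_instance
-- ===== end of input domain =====

-- B replaces A's index-collecting loop + sort + consecutive-grouping helper by a single
-- pass that emits (start, end) ranges directly (objective: simpler; return value only).

-- ===== PORT A =====
-- Python 'c in s' for a single character c: substring test = character membership
def pvInStr (c : Char) (s : String) : Bool := s.toList.contains c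

-- grouped[-1].append(j)
def pvAppendLast (gs : List (List Int)) (j : Int) : List (List Int) :=
  match gs with
  | [] => []
  | [g] => [g ++ [j]]
  | g :: rest => g :: pvAppendLast rest j

-- loop body of group_consecutive_int
def pvGStep (grouped : List (List Int)) (p : Int × Int) : List (List Int) :=
  if p.2 == p.1 + 1 then pvAppendLast grouped p.2
  else if p.2 > p.1 + 1 then grouped ++ [[p.2]]
  else grouped  -- assert False: unreachable, the list is sorted with distinct elements here

def group_consecutive_int (int_list : List Int) : List (List Int) :=
  if int_list.isEmpty then []
  else
    let l := PySem.List.sorted int_list (fun x => x) false  -- int_list.sort()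
    (List.zip (PySem.List.slice l none (some (-1))) (PySem.List.slice l (some 1) none)).foldl
      pvGStep [[PySem.List.pyGetD l 0 0]]  -- groups are nonempty by construction: gp[0] safe

-- loop body of get_insertions
def pvStepA (spacers : String) (s : List Int × Bool) (p : Int × (Char × Char)) : List Int × Bool :=
  let gap_open :=
    if !(pvInStr p.2.1 spacers) && pvInStr p.2.2 spacers then true
    else if !(pvInStr p.2.2 spacers) then false
    else s.2
  (if gap_open then s.1 ++ [p.1] else s.1, gap_open)

def get_insertions (seq : String) (ref : String) (spacers : String) : List (Int × Int) :=
  let st := (PySem.List.enumerate (List.zip seq.toList ref.toList) 0).foldl (pvStepA spacers) ([], false)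
  -- gp[0], gp[-1]: every group is nonempty, so the default of pyGetD is never used
  (group_consecutive_int st.1).map
    (fun gp => (PySem.List.pyGetD gp 0 0, PySem.List.pyGetD gp (-1) 0))

-- ===== PORT B =====
-- loop body of B: advance (out, start)
def pvStepB (spacers : String) (s : List (Int × Int) × Option Int) (p : Int × (Char × Char)) :
    List (Int × Int) × Option Int :=
  if !(pvInStr p.2.1 spacers) && pvInStr p.2.2 spacers then
    (s.1, match s.2 with | none => some p.1 | some v => some v)
  else if !(pvInStr p.2.2 spacers) then
    (match s.2 with | none => s.1 | some v => s.1 ++ [(v, p.1 - 1)], none)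
  else s

def get_insertions_alt (seq : String) (ref : String) (spacers : String) : List (Int × Int) :=
  let pairs := List.zip seq.toList ref.toList
  let n : Int := pairs.length  -- n = min(len(seq), len(ref))
  let st := (PySem.List.enumerate pairs 0).foldl (pvStepB spacers) ([], none)
  match st.2 with
  | none => st.1
  | some v => st.1 ++ [(v, n - 1)]

-- ===== PRECONDITION & SPEC =====
def Spec_get_insertions (seq : String) (ref : String) (spacers : String) (out : List (Int × Int)) : Prop := out = get_insertions_alt seq ref spacers
instance (seq : String) (ref : String) (spacers : String) (out : List (Int × Int)) : Decidable (Spec_get_insertions seq ref spacers out) := by unfold Spec_get_insertions; infer_instance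

-- ===== CLAIM (what is proved, stated in full; the proofs are below) =====
def Claim_equal_get_insertions : Prop := ∀ (seq : String) (ref : String) (spacers : String), Dom_get_insertions seq ref spacers → Spec_get_insertions seq ref spacers (get_insertions seq ref spacers)

-- ===== LEMMAS AND PROOFS =====

-- block of n consecutive integers starting at a
def pvSeg (a : Int) : Nat → List Int
  | 0 => []
  | n+1 => a :: pvSeg (a+1) n

def pvSegOf (r : Int × Int) : List Int := pvSeg r.1 (r.2 - r.1 + 1).toNat

def pvExpand (rs : List (Int × Int)) : List Int := rs.flatMap pvSegOf

def pvOpenSeg (st : Option Int) (i : Int) : List Int :=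
  match st with | none => [] | some s => pvSeg s (i - s).toNat

def pvOptRange (st : Option Int) (n : Int) : List (Int × Int) :=
  match st with | none => [] | some s => [(s, n - 1)]

-- separated chain of nonempty ranges: starts ≥ lo, each a ≤ b, gap ≥ 2 between ranges
def ChainR (lo : Int) : List (Int × Int) → Prop
  | [] => True
  | (a, b) :: rest => lo ≤ a ∧ a ≤ b ∧ ChainR (b + 2) rest

-- loop invariant shape: closed ranges in acc, then (optionally) an open run start < i
def ChainOK (lo : Int) (acc : List (Int × Int)) (st : Option Int) (i : Int) : Prop :=
  match acc, st with
  | [], none => lo ≤ i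
  | [], some s => lo ≤ s ∧ s < i
  | (a, b) :: rest, st => lo ≤ a ∧ a ≤ b ∧ ChainOK (b + 2) rest st i

-- adjacent pairs, = zip l[:-1] l[1:]
def pvAdj : List Int → List (Int × Int)
  | [] => []
  | [_] => []
  | x :: y :: t => (x, y) :: pvAdj (y :: t)

lemma pvSeg_snoc (n : Nat) : ∀ a : Int, pvSeg a (n+1) = pvSeg a n ++ [a + n] := by
  induction n with
  | zero => intro a; simp [pvSeg]
  | succ n ih =>
    intro a
    rw [show pvSeg a (n+1+1) = a :: pvSeg (a+1) (n+1) from rfl,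
        show pvSeg a (n+1) = a :: pvSeg (a+1) n from rfl, ih (a+1)]
    simp
    ring

lemma zip_dropLast_tail : ∀ l : List Int, List.zip l.dropLast l.tail = pvAdj l
  | [] => rfl
  | [_] => rfl
  | x :: y :: t => by
    have ih := zip_dropLast_tail (y :: t)
    simp only [List.tail_cons] at ih ⊢
    rw [show (x :: y :: t).dropLast = x :: (y :: t).dropLast from rfl]
    rw [show List.zip (x :: (y :: t).dropLast) (y :: t) = (x, y) :: List.zip (y :: t).dropLast t from rfl]
    rw [show pvAdj (x :: y :: t) = (x, y) :: pvAdj (y :: t) from rfl]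
    have : List.zip (y :: t).dropLast t = pvAdj (y :: t) := by
      simpa using ih
    rw [this]

lemma pyGetD_cons_zero (l : List Int) (x d : Int) : PySem.List.pyGetD (x :: l) 0 d = x := by
  simp [PySem.List.pyGetD, PySem.List.pyGet?, PySem.List.pyIdx?]

lemma pyGetD_snoc_neg_one (l : List Int) (x d : Int) : PySem.List.pyGetD (l ++ [x]) (-1) d = x := by
  simp [PySem.List.pyGetD, PySem.List.pyGet?, PySem.List.pyIdx?]

lemma pvAppendLast_snoc (gs : List (List Int)) (cur : List Int) (j : Int) :
    pvAppendLast (gs ++ [cur]) j = gs ++ [cur ++ [j]] := by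
  induction gs with
  | nil => simp [pvAppendLast]
  | cons g gs ih =>
    cases gs with
    | nil => simp [pvAppendLast] at *
    | cons h t => simp [pvAppendLast] at *; exact ih

lemma fold_block (n : Nat) : ∀ (a : Int) (suf : List Int) (gs : List (List Int)) (cur : List Int),
    List.foldl pvGStep (gs ++ [cur]) (pvAdj (a :: (pvSeg (a+1) n ++ suf)))
      = List.foldl pvGStep (gs ++ [cur ++ pvSeg (a+1) n]) (pvAdj ((a + n) :: suf)) := by
  induction n with
  | zero => intro a suf gs cur; simp [pvSeg]
  | succ n ih =>
    intro a suf gs cur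
    rw [show pvSeg (a+1) (n+1) = (a+1) :: pvSeg (a+1+1) n from rfl]
    simp only [List.cons_append]
    rw [show pvAdj (a :: (a+1) :: (pvSeg (a+1+1) n ++ suf)) = (a, a+1) :: pvAdj ((a+1) :: (pvSeg (a+1+1) n ++ suf)) from rfl]
    rw [List.foldl_cons]
    rw [show pvGStep (gs ++ [cur]) (a, a+1) = gs ++ [cur ++ [a+1]] from by
      simp [pvGStep, pvAppendLast_snoc]]
    rw [ih (a+1) suf gs (cur ++ [a+1])]
    have h1 : a + 1 + (n : Int) = a + ((n : Int) + 1) := by ring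
    simp [h1]

lemma fold_chain : ∀ (rs : List (Int × Int)) (lo prev : Int) (gs : List (List Int)) (cur : List Int),
    ChainR lo rs → prev + 1 < lo →
    List.foldl pvGStep (gs ++ [cur]) (pvAdj (prev :: pvExpand rs)) = gs ++ [cur] ++ rs.map pvSegOf := by
  intro rs
  induction rs with
  | nil => intro lo prev gs cur _ _; simp [pvExpand, pvAdj]
  | cons r rest ih =>
    intro lo prev gs cur hch hlt
    obtain ⟨a, b⟩ := r
    obtain ⟨h1, h2, h3⟩ := hch
    have hk : (b - a + 1).toNat = (b - a).toNat + 1 := by omega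
    rw [show pvExpand ((a,b) :: rest) = pvSegOf (a,b) ++ pvExpand rest from rfl]
    rw [show pvSegOf (a,b) = pvSeg a ((b - a + 1).toNat) from rfl, hk]
    rw [show pvSeg a ((b - a).toNat + 1) = a :: pvSeg (a+1) (b - a).toNat from rfl]
    simp only [List.cons_append]
    rw [show pvAdj (prev :: a :: (pvSeg (a+1) (b - a).toNat ++ pvExpand rest))
        = (prev, a) :: pvAdj (a :: (pvSeg (a+1) (b - a).toNat ++ pvExpand rest)) from rfl]
    rw [List.foldl_cons]
    rw [show pvGStep (gs ++ [cur]) (prev, a) = (gs ++ [cur]) ++ [[a]] from by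
      have hne : ¬ (a = prev + 1) := by omega
      have hgt : a > prev + 1 := by omega
      simp [pvGStep, hne, hgt]]
    rw [fold_block ((b - a).toNat) a (pvExpand rest) (gs ++ [cur]) [a]]
    have hak : a + (((b - a).toNat : Nat) : Int) = b := by omega
    have hseg : [a] ++ pvSeg (a+1) (b - a).toNat = pvSegOf (a, b) := by
      rw [show pvSegOf (a,b) = pvSeg a ((b - a + 1).toNat) from rfl, hk]; rfl
    rw [hak, hseg]
    rw [ih (b+2) b (gs ++ [cur]) (pvSegOf (a,b)) h3 (by omega)]
    simp

lemma mem_pvSeg : ∀ (n : Nat) (a x : Int), x ∈ pvSeg a n → a ≤ x ∧ x < a + n := by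
  intro n
  induction n with
  | zero => intro a x h; simp [pvSeg] at h
  | succ n ih =>
    intro a x h
    rw [show pvSeg a (n+1) = a :: pvSeg (a+1) n from rfl] at h
    rcases List.mem_cons.mp h with h | h
    · subst h; constructor
      · omega
      · push_cast; omega
    · have := ih (a+1) x h; constructor <;> push_cast at * <;> omega

lemma pvSeg_pairwise : ∀ (n : Nat) (a : Int), (pvSeg a n).Pairwise (· ≤ ·) := by
  intro n
  induction n with
  | zero => intro a; simp [pvSeg]
  | succ n ih =>
    intro a
    rw [show pvSeg a (n+1) = a :: pvSeg (a+1) n from rfl]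
    refine List.pairwise_cons.mpr ⟨?_, ih (a+1)⟩
    intro x hx
    have := mem_pvSeg n (a+1) x hx
    omega

lemma chainR_pairwise : ∀ (rs : List (Int × Int)) (lo : Int), ChainR lo rs →
    (pvExpand rs).Pairwise (· ≤ ·) ∧ ∀ x ∈ pvExpand rs, lo ≤ x := by
  intro rs
  induction rs with
  | nil => intro lo _; simp [pvExpand]
  | cons r rest ih =>
    intro lo h
    obtain ⟨a, b⟩ := r
    obtain ⟨h1, h2, h3⟩ := h
    have hrest := ih (b+2) h3
    rw [show pvExpand ((a,b) :: rest) = pvSegOf (a,b) ++ pvExpand rest from rfl]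
    have hsegmem : ∀ x ∈ pvSegOf (a,b), a ≤ x ∧ x ≤ b := by
      intro x hx
      have := mem_pvSeg _ _ _ hx
      omega
    constructor
    · refine List.pairwise_append.mpr ⟨pvSeg_pairwise _ _, hrest.1, ?_⟩
      intro x hx y hy
      have hx' := hsegmem x hx
      have hy' := hrest.2 y hy
      omega
    · intro x hx
      rcases List.mem_append.mp hx with h | h
      · exact le_trans h1 (hsegmem x h).1
      · have := hrest.2 x h; omega

lemma openSeg_snoc (s i : Int) (h : s ≤ i) :
    pvOpenSeg (some s) i ++ [i] = pvOpenSeg (some s) (i+1) := by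
  have ht : (i + 1 - s).toNat = (i - s).toNat + 1 := by omega
  rw [show pvOpenSeg (some s) (i+1) = pvSeg s ((i+1-s).toNat) from rfl, ht, pvSeg_snoc]
  have h2 : s + (((i - s).toNat : Nat) : Int) = i := by omega
  rw [show pvOpenSeg (some s) i = pvSeg s ((i-s).toNat) from rfl, h2]

lemma group_expand (rs : List (Int × Int)) (h : ChainR 0 rs) :
    group_consecutive_int (pvExpand rs) = rs.map pvSegOf := by
  cases rs with
  | nil => simp [pvExpand, group_consecutive_int]
  | cons r rest =>
    obtain ⟨a, b⟩ := r
    obtain ⟨h1, h2, h3⟩ := h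
    have hk : (b - a + 1).toNat = (b - a).toNat + 1 := by omega
    have hexp : pvExpand ((a,b) :: rest) = a :: (pvSeg (a+1) (b - a).toNat ++ pvExpand rest) := by
      rw [show pvExpand ((a,b) :: rest) = pvSegOf (a,b) ++ pvExpand rest from rfl,
          show pvSegOf (a,b) = pvSeg a ((b - a + 1).toNat) from rfl, hk,
          show pvSeg a ((b - a).toNat + 1) = a :: pvSeg (a+1) (b - a).toNat from rfl]
      simp
    have hpw : (pvExpand ((a,b) :: rest)).Pairwise (· ≤ ·) :=
      (chainR_pairwise ((a,b) :: rest) 0 (show ChainR 0 ((a,b) :: rest) from ⟨h1, h2, h3⟩)).1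
    rw [group_consecutive_int]
    rw [hexp] at hpw ⊢
    simp only [List.isEmpty_cons, if_false, Bool.false_eq_true]
    have hsorted : PySem.List.sorted (a :: (pvSeg (a+1) (b - a).toNat ++ pvExpand rest)) (fun x => x) false
        = a :: (pvSeg (a+1) (b - a).toNat ++ pvExpand rest) :=
      PySem.List.sorted_eq_self_of_pairwise _ _ hpw
    have hz := zip_dropLast_tail (a :: (pvSeg (a+1) (b - a).toNat ++ pvExpand rest))
    rw [hsorted, PySem.List.slice_to_neg_one, PySem.List.slice_from_one, hz, pyGetD_cons_zero]
    rw [show ([[a]] : List (List Int)) = [] ++ [[a]] from rfl]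
    rw [fold_block ((b - a).toNat) a (pvExpand rest) [] [a]]
    have hak : a + (((b - a).toNat : Nat) : Int) = b := by omega
    have hseg : [a] ++ pvSeg (a+1) (b - a).toNat = pvSegOf (a, b) := by
      rw [show pvSegOf (a,b) = pvSeg a ((b - a + 1).toNat) from rfl, hk]; rfl
    rw [hak, hseg]
    rw [fold_chain rest (b+2) b [] (pvSegOf (a,b)) h3 (by omega)]
    simp

lemma map_ends_segOf : ∀ (rs : List (Int × Int)) (lo : Int), ChainR lo rs →
    (rs.map pvSegOf).map (fun gp => (PySem.List.pyGetD gp 0 0, PySem.List.pyGetD gp (-1) 0)) = rs := by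
  intro rs
  induction rs with
  | nil => intro lo _; simp
  | cons r rest ih =>
    intro lo h
    obtain ⟨a, b⟩ := r
    obtain ⟨h1, h2, h3⟩ := h
    simp only [List.map_cons]
    rw [ih _ h3]
    have hk : (b - a + 1).toNat = (b - a).toNat + 1 := by omega
    congr 1
    have hfst : PySem.List.pyGetD (pvSegOf (a, b)) 0 0 = a := by
      rw [show pvSegOf (a,b) = pvSeg a ((b - a + 1).toNat) from rfl, hk,
          show pvSeg a ((b - a).toNat + 1) = a :: pvSeg (a+1) (b - a).toNat from rfl,
          pyGetD_cons_zero]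
    have hsnd : PySem.List.pyGetD (pvSegOf (a, b)) (-1) 0 = b := by
      rw [show pvSegOf (a,b) = pvSeg a ((b - a + 1).toNat) from rfl, hk, pvSeg_snoc,
          pyGetD_snoc_neg_one]
      omega
    rw [hfst, hsnd]

lemma chainok_mono : ∀ (acc : List (Int × Int)) (lo : Int) (st : Option Int) (i j : Int),
    ChainOK lo acc st i → i ≤ j → ChainOK lo acc st j := by
  intro acc
  induction acc with
  | nil => intro lo st i j h hij; cases st <;> simp [ChainOK] at * <;> omega
  | cons r rest ih =>
    intro lo st i j h hij
    obtain ⟨a, b⟩ := r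
    simp [ChainOK] at *
    exact ⟨h.1, h.2.1, ih _ _ _ _ h.2.2 hij⟩

lemma chainok_open : ∀ (acc : List (Int × Int)) (lo i : Int),
    ChainOK lo acc none i → ChainOK lo acc (some i) (i+1) := by
  intro acc
  induction acc with
  | nil => intro lo i h; simp [ChainOK] at *; omega
  | cons r rest ih =>
    intro lo i h
    obtain ⟨a, b⟩ := r
    simp [ChainOK] at *
    exact ⟨h.1, h.2.1, ih _ _ h.2.2⟩

lemma chainok_close : ∀ (acc : List (Int × Int)) (lo s i : Int),
    ChainOK lo acc (some s) i → ChainOK lo (acc ++ [(s, i-1)]) none (i+1) := by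
  intro acc
  induction acc with
  | nil => intro lo s i h; simp [ChainOK] at *; omega
  | cons r rest ih =>
    intro lo s i h
    obtain ⟨a, b⟩ := r
    simp [ChainOK] at *
    exact ⟨h.1, h.2.1, ih _ _ _ h.2.2⟩

lemma chainok_lt : ∀ (acc : List (Int × Int)) (lo s i : Int),
    ChainOK lo acc (some s) i → s < i := by
  intro acc
  induction acc with
  | nil => intro lo s i h; exact h.2
  | cons r rest ih =>
    intro lo s i h
    obtain ⟨a, b⟩ := r
    exact ih _ _ _ h.2.2

lemma chainok_chainR : ∀ (acc : List (Int × Int)) (lo : Int) (st : Option Int) (n : Int),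
    ChainOK lo acc st n → ChainR lo (acc ++ pvOptRange st n) := by
  intro acc
  induction acc with
  | nil =>
    intro lo st n h
    cases st with
    | none => simp [ChainR, pvOptRange]
    | some s => simp [ChainR, pvOptRange, ChainOK] at *; omega
  | cons r rest ih =>
    intro lo st n h
    obtain ⟨a, b⟩ := r
    simp [ChainR, ChainOK] at *
    exact ⟨h.1, h.2.1, ih _ _ _ h.2.2⟩

lemma expand_snoc (acc : List (Int × Int)) (r : Int × Int) :
    pvExpand (acc ++ [r]) = pvExpand acc ++ pvSegOf r := by
  simp [pvExpand]

lemma expand_optRange (acc : List (Int × Int)) (st : Option Int) (n : Int) :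
    pvExpand (acc ++ pvOptRange st n) = pvExpand acc ++ pvOpenSeg st n := by
  cases st with
  | none => simp [pvOptRange, pvOpenSeg, pvExpand]
  | some s =>
    rw [show pvOptRange (some s) n = [(s, n-1)] from rfl, expand_snoc]
    have h : n - 1 - s + 1 = n - s := by ring
    simp [pvSegOf, pvOpenSeg, h]

lemma loop_rel (spacers : String) : ∀ (ps : List (Char × Char)) (i lo : Int) (acc : List (Int × Int)) (st : Option Int),
    ChainOK lo acc st i →
    List.foldl (pvStepA spacers) (pvExpand acc ++ pvOpenSeg st i, st.isSome) (PySem.List.enumerate ps i)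
      = (pvExpand (List.foldl (pvStepB spacers) (acc, st) (PySem.List.enumerate ps i)).1
          ++ pvOpenSeg (List.foldl (pvStepB spacers) (acc, st) (PySem.List.enumerate ps i)).2 (i + ps.length),
         (List.foldl (pvStepB spacers) (acc, st) (PySem.List.enumerate ps i)).2.isSome)
    ∧ ChainOK lo (List.foldl (pvStepB spacers) (acc, st) (PySem.List.enumerate ps i)).1
        (List.foldl (pvStepB spacers) (acc, st) (PySem.List.enumerate ps i)).2 (i + ps.length) := by
  intro ps
  induction ps with
  | nil =>
    intro i lo acc st h
    simp only [PySem.List.enumerate, List.foldl_nil, List.length_nil, Nat.cast_zero, add_zero]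
    exact ⟨trivial, h⟩
  | cons p ps ih =>
    intro i lo acc st h
    obtain ⟨c1, c2⟩ := p
    rw [PySem.List.enumerate_cons]
    simp only [List.foldl_cons, List.length_cons, Nat.cast_add, Nat.cast_one]
    rw [show i + ((ps.length : Int) + 1) = (i + 1) + (ps.length : Int) from by ring]
    by_cases h2 : pvInStr c2 spacers = true
    · by_cases h1 : pvInStr c1 spacers = true
      · -- both in spacers: pass, state unchanged (an open run keeps collecting)
        cases st with
        | some s =>
          have hlt := chainok_lt acc lo s i h
          rw [show pvStepA spacers (pvExpand acc ++ pvOpenSeg (some s) i, (some s).isSome) (i, (c1, c2))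
              = (pvExpand acc ++ pvOpenSeg (some s) (i+1), (some s).isSome) from by
            simp [pvStepA, h1, h2, List.append_assoc, openSeg_snoc s i (by omega)]]
          rw [show pvStepB spacers (acc, some s) (i, (c1, c2)) = (acc, some s) from by
            simp [pvStepB, h1, h2]]
          exact ih (i+1) lo acc (some s) (chainok_mono acc lo (some s) i (i+1) h (by omega))
        | none =>
          rw [show pvStepA spacers (pvExpand acc ++ pvOpenSeg none i, (none : Option Int).isSome) (i, (c1, c2))
              = (pvExpand acc ++ pvOpenSeg none (i+1), (none : Option Int).isSome) from by
            simp [pvStepA, h1, h2, pvOpenSeg]]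
          rw [show pvStepB spacers (acc, none) (i, (c1, c2)) = (acc, none) from by
            simp [pvStepB, h1, h2]]
          exact ih (i+1) lo acc none (chainok_mono acc lo none i (i+1) h (by omega))
      · -- seq residue over a ref gap: open (or keep) the run
        cases st with
        | some s =>
          have hlt := chainok_lt acc lo s i h
          rw [show pvStepA spacers (pvExpand acc ++ pvOpenSeg (some s) i, (some s).isSome) (i, (c1, c2))
              = (pvExpand acc ++ pvOpenSeg (some s) (i+1), (some s).isSome) from by
            simp [pvStepA, h1, h2, List.append_assoc, openSeg_snoc s i (by omega)]]
          rw [show pvStepB spacers (acc, some s) (i, (c1, c2)) = (acc, some s) from by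
            simp [pvStepB, h1, h2]]
          exact ih (i+1) lo acc (some s) (chainok_mono acc lo (some s) i (i+1) h (by omega))
        | none =>
          rw [show pvStepA spacers (pvExpand acc ++ pvOpenSeg none i, (none : Option Int).isSome) (i, (c1, c2))
              = (pvExpand acc ++ pvOpenSeg (some i) (i+1), (some i).isSome) from by
            simp [pvStepA, h1, h2, pvOpenSeg, pvSeg]]
          rw [show pvStepB spacers (acc, none) (i, (c1, c2)) = (acc, some i) from by
            simp [pvStepB, h1, h2]]
          exact ih (i+1) lo acc (some i) (chainok_open acc lo i h)
    · -- ref residue (not a spacer): close any open run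
      cases st with
      | some s =>
        have hlt := chainok_lt acc lo s i h
        rw [show pvStepA spacers (pvExpand acc ++ pvOpenSeg (some s) i, (some s).isSome) (i, (c1, c2))
            = (pvExpand (acc ++ [(s, i-1)]) ++ pvOpenSeg none (i+1), (none : Option Int).isSome) from by
          have harg : i - 1 - s + 1 = i - s := by ring
          simp [pvStepA, h2, expand_snoc, pvOpenSeg, pvSegOf, harg]]
        rw [show pvStepB spacers (acc, some s) (i, (c1, c2)) = (acc ++ [(s, i-1)], none) from by
          simp [pvStepB, h2]]
        exact ih (i+1) lo (acc ++ [(s, i-1)]) none (chainok_close acc lo s i h)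
      | none =>
        rw [show pvStepA spacers (pvExpand acc ++ pvOpenSeg none i, (none : Option Int).isSome) (i, (c1, c2))
            = (pvExpand acc ++ pvOpenSeg none (i+1), (none : Option Int).isSome) from by
          simp [pvStepA, h2, pvOpenSeg]]
        rw [show pvStepB spacers (acc, none) (i, (c1, c2)) = (acc, none) from by
          simp [pvStepB, h2]]
        exact ih (i+1) lo acc none (chainok_mono acc lo none i (i+1) h (by omega))

-- ===== VERDICT (by name: the statement is the Claim_ definition above) =====
theorem get_insertions_spec : Claim_equal_get_insertions := by
  intro seq ref spacers _
  simp only [Spec_get_insertions, get_insertions, get_insertions_alt]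
  have h0 : ChainOK 0 ([] : List (Int × Int)) none 0 := by simp [ChainOK]
  obtain ⟨H1, H2⟩ := loop_rel spacers (List.zip seq.toList ref.toList) 0 0 [] none h0
  have hn : (0 : Int) + ((List.zip seq.toList ref.toList).length : Int)
      = ((List.zip seq.toList ref.toList).length : Int) := by ring
  rw [hn] at H1 H2
  rw [show (([], false) : List Int × Bool)
      = (pvExpand [] ++ pvOpenSeg none 0, (none : Option Int).isSome) from rfl]
  rw [H1]
  have hcr := chainok_chainR _ 0 _ _ H2
  rw [← expand_optRange _ _ ((List.zip seq.toList ref.toList).length : Int)]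
  rw [group_expand _ hcr, map_ends_segOf _ 0 hcr]
  cases hst : (List.foldl (pvStepB spacers) ([], none)
      (PySem.List.enumerate (List.zip seq.toList ref.toList) 0)).2 <;>
    simp [pvOptRange]
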